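-- pv_equiv track=rewrite | github.com/erikm6872/MatrixMultPy | dcmm_simplified.py | recombineSubMatrices
-- ===== SOURCE A (Python) =====
-- def recombineSubMatrices(a,b,c,d):  #a = m11, b = m12, c = m21, d = m22
--         n = len(a) * 2
--         retM = [[0 for x in range(n)] for x in range(n)]
--         for i in range(len(a)):
--             for j in range(len(a)):
--                 retM[i][j] = a[i][j]    #Copy values from a -> upper left
--             for k in range(len(a), n):
--                 retM[i][k] = b[i][k-len(a)] #Copy values from b -> upper right
--         for l in range(len(a), n):
--             for m in range(len(a)):
--                 retM[l][m] = c[l-len(a)][m] #c -> lower left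
--             for o in range(len(a), n):
--                 retM[l][o] = d[l-len(a)][o-len(a)]  #d -> lower right
--         return retM
-- ===== SOURCE B (Python) =====
-- def recombineSubMatrices(a, b, c, d):  # a = m11, b = m12, c = m21, d = m22
--     n = len(a)
--     top = [a[i][:n] + b[i][:n] for i in range(n)]
--     bottom = [c[i][:n] + d[i][:n] for i in range(n)]
--     return top + bottom
-- ===== Notes on version B (the rewrite author's own statement) =====
-- stated objective: simpler
-- what changed: B builds the block matrix directly by row concatenation (a[i]+b[i] for the top half, c[i]+d[i] for the bottom) instead of preallocating a 2n x 2n zero matrix and copying every element with four index-offset inner loops.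
import Mathlib
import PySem

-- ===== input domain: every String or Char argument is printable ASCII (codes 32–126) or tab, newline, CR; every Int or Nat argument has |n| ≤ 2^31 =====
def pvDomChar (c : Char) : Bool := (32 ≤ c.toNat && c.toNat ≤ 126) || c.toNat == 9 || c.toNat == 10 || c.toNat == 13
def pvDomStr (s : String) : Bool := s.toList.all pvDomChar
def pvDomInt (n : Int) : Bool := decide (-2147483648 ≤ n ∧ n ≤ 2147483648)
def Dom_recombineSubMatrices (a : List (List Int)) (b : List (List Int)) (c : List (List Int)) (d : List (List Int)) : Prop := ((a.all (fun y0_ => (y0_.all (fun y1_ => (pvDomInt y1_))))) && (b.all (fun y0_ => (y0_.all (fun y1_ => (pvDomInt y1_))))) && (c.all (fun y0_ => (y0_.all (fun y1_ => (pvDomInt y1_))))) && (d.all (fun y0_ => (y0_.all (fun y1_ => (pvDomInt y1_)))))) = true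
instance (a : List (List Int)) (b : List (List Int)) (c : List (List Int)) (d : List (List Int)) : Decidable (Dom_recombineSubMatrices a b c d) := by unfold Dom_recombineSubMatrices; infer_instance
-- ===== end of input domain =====

-- B builds the block matrix by row concatenation (a[i]+b[i] on top, c[i]+d[i] below) instead of
-- per-element index writes into a preallocated zero matrix; objective: simpler, same O(n^2) cost.

-- ===== PORT A =====
-- retM[i][j] = v  (all indices here are nonnegative, so Nat indexing via set/getD is exact)
def pvSet2 (m : List (List Int)) (i j : Nat) (v : Int) : List (List Int) :=
  m.set i ((m.getD i []).set j v)

-- Python's range(len(a)) → List.range, range(len(a), n) → List.range' la (n - la); exact, all bounds nonneg.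
-- Under Pre_ every getD index is in range, so getD matches Python indexing (no default is ever taken).
def recombineSubMatrices (a : List (List Int)) (b : List (List Int)) (c : List (List Int)) (d : List (List Int)) : List (List Int) :=
  let la := a.length
  let n := la * 2
  let retM : List (List Int) := (List.range n).map (fun _ => (List.range n).map (fun _ => (0 : Int)))
  let retM := (List.range la).foldl (fun m i =>
      let m := (List.range la).foldl (fun m j => pvSet2 m i j ((a.getD i []).getD j 0)) m
      (List.range' la (n - la)).foldl (fun m k => pvSet2 m i k ((b.getD i []).getD (k - la) 0)) m) retM
  let retM := (List.range' la (n - la)).foldl (fun m l =>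
      let m := (List.range la).foldl (fun m j => pvSet2 m l j ((c.getD (l - la) []).getD j 0)) m
      (List.range' la (n - la)).foldl (fun m o => pvSet2 m l o ((d.getD (l - la) []).getD (o - la) 0)) m) retM
  retM

-- ===== PORT B =====
-- Source B:  n = len(a); top = [a[i][:n] + b[i][:n] ...]; bottom = [c[i][:n] + d[i][:n] ...]; top + bottom
-- (row[:n] with n ≥ 0 is List.take n; indices i < n are in range under Pre_, so getD is exact)
def recombineSubMatrices_alt (a : List (List Int)) (b : List (List Int)) (c : List (List Int)) (d : List (List Int)) : List (List Int) :=
  let n := a.length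
  let top := (List.range n).map (fun i => (a.getD i []).take n ++ (b.getD i []).take n)
  let bottom := (List.range n).map (fun i => (c.getD i []).take n ++ (d.getD i []).take n)
  top ++ bottom

-- ===== PRECONDITION & SPEC =====
-- Pre_ is exactly where the Python A returns without IndexError: b, c, d have at least len(a) rows
-- and every row read from (all of a, the first len(a) rows of b, c, d) has at least len(a) entries.
def Pre_recombineSubMatrices (a : List (List Int)) (b : List (List Int)) (c : List (List Int)) (d : List (List Int)) : Prop :=
  a.length ≤ b.length ∧ a.length ≤ c.length ∧ a.length ≤ d.length ∧
  (∀ r ∈ a, a.length ≤ r.length) ∧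
  (∀ r ∈ b.take a.length, a.length ≤ r.length) ∧
  (∀ r ∈ c.take a.length, a.length ≤ r.length) ∧
  (∀ r ∈ d.take a.length, a.length ≤ r.length)
instance (a : List (List Int)) (b : List (List Int)) (c : List (List Int)) (d : List (List Int)) : Decidable (Pre_recombineSubMatrices a b c d) := by unfold Pre_recombineSubMatrices; infer_instance

def pvWitness_recombineSubMatrices : List (List Int) × List (List Int) × List (List Int) × List (List Int) :=
  ([[1, 2], [3, 4]], [[5, 6], [7, 8]], [[9, 10], [11, 12]], [[13, 14], [15, 16]])

def Spec_recombineSubMatrices (a : List (List Int)) (b : List (List Int)) (c : List (List Int)) (d : List (List Int)) (out : List (List Int)) : Prop := out = recombineSubMatrices_alt a b c d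
instance (a : List (List Int)) (b : List (List Int)) (c : List (List Int)) (d : List (List Int)) (out : List (List Int)) : Decidable (Spec_recombineSubMatrices a b c d out) := by unfold Spec_recombineSubMatrices; infer_instance

-- ===== CLAIM (what is proved, stated in full; the proofs are below) =====
def Claim_equal_recombineSubMatrices : Prop := ∀ (a : List (List Int)) (b : List (List Int)) (c : List (List Int)) (d : List (List Int)), Dom_recombineSubMatrices a b c d → Pre_recombineSubMatrices a b c d → Spec_recombineSubMatrices a b c d (recombineSubMatrices a b c d)

-- ===== LEMMAS AND PROOFS =====

theorem pvGetD_set_self {α : Type} (l : List α) (i : Nat) (v dflt : α) (h : i < l.length) :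
    (l.set i v).getD i dflt = v := by
  simp [List.getD_eq_getElem?_getD, h]

theorem pvSet_getD_self {α : Type} (l : List α) (i : Nat) (dflt : α) (h : i < l.length) :
    l.set i (l.getD i dflt) = l := by
  rw [List.getD_eq_getElem l dflt h]
  exact List.set_getElem_self h

-- a fold over consecutive indices that replaces entry i by T i, preserving an invariant Q on entries
theorem pvFoldSet {α : Type} (f : List α → Nat → List α) (T : Nat → α) (Q : α → Prop)
    (hT : ∀ i, Q (T i))
    (hf : ∀ (m : List α) (i : Nat), i < m.length → (∀ x ∈ m, Q x) → f m i = m.set i (T i)) :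
    ∀ (k s : Nat) (m : List α), s + k ≤ m.length → (∀ x ∈ m, Q x) →
      (List.range' s k).foldl f m = m.take s ++ (List.range' s k).map T ++ m.drop (s + k) := by
  intro k
  induction k with
  | zero => intro s m h hQ; simp
  | succ k ih =>
    intro s m h hQ
    have hs : s < m.length := by omega
    rw [List.range'_succ]
    simp only [List.foldl_cons, List.map_cons]
    rw [hf m s hs hQ]
    have hQ' : ∀ x ∈ m.set s (T s), Q x := by
      intro x hx
      rcases List.mem_or_eq_of_mem_set hx with h1 | h1
      · exact hQ x h1
      · exact h1 ▸ hT s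
    rw [ih (s + 1) (m.set s (T s)) (by simpa using by omega) hQ']
    rw [List.set_eq_take_cons_drop (T s) hs]
    have htk : (m.take s).length = s := by simp; omega
    rw [List.take_append, List.drop_append, htk]
    have h1 : (m.take s).take (s + 1) = m.take s := List.take_of_length_le (by omega)
    have h2 : (m.take s).drop (s + 1 + k) = [] := List.drop_eq_nil_of_le (by omega)
    have h3 : s + 1 - s = 1 := by omega
    have h4 : s + 1 + k - s = k + 1 := by omega
    rw [h1, h2, h3, h4]
    simp [List.drop_drop]
    omega

theorem pvSet2_factor :
    ∀ (k s : Nat) (m : List (List Int)) (i : Nat) (g : Nat → Int), i < m.length →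
      (List.range' s k).foldl (fun m j => pvSet2 m i j (g j)) m
        = m.set i ((List.range' s k).foldl (fun r j => r.set j (g j)) (m.getD i [])) := by
  intro k
  induction k with
  | zero =>
    intro s m i g h
    have hr : List.range' s 0 = [] := rfl
    rw [hr]
    simp only [List.foldl_nil]
    exact (pvSet_getD_self m i [] h).symm
  | succ k ih =>
    intro s m i g h
    rw [List.range'_succ]
    simp only [List.foldl_cons]
    have h' : i < (pvSet2 m i s (g s)).length := by simp [pvSet2, h]
    rw [ih (s + 1) _ i g h']
    simp only [pvSet2]
    rw [List.set_set, pvGetD_set_self m i _ [] h]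

-- row fold over consecutive positions: setting positions s..s+k-1 of a row
theorem pvRowFold (k s : Nat) (r : List Int) (g : Nat → Int) (h : s + k ≤ r.length) :
    (List.range' s k).foldl (fun r j => r.set j (g j)) r
      = r.take s ++ (List.range' s k).map g ++ r.drop (s + k) :=
  pvFoldSet _ g (fun _ => True) (fun _ => trivial) (fun _ _ _ _ => rfl) k s r h (fun _ _ => trivial)

-- a row read under Pre_: the first la entries of row i of x, as a map over indices
theorem pvTakeAsMap (l : List Int) (k : Nat) (h : k ≤ l.length) :
    l.take k = (List.range' 0 k).map (fun j => l.getD j 0) := by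
  apply List.ext_getElem
  · simp [h]
  · intro i h1 h2
    simp only [List.length_take] at h1
    have hi : i < l.length := lt_of_lt_of_le (lt_min_iff.mp h1).1 h
    simp [List.getElem_range', List.getD_eq_getElem?_getD, List.getElem?_eq_getElem hi]

theorem pvPreRow (x : List (List Int)) (n i : Nat) (h1 : n ≤ x.length)
    (h2 : ∀ r ∈ x.take n, n ≤ r.length) (hi : i < n) : n ≤ (x.getD i []).length := by
  have hib : i < x.length := lt_of_lt_of_le hi h1
  rw [List.getD_eq_getElem x [] hib]
  refine h2 _ ?_
  have hlt : i < (x.take n).length := by simp; omega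
  have he : (x.take n)[i]'hlt = x[i]'hib := List.getElem_take
  exact he ▸ List.getElem_mem hlt

-- the row the two inner folds of A produce for row index i of the upper half (x = a, y = b)
-- and, reindexed, of the lower half (x = c, y = d)
def pvRow (x y : List (List Int)) (la i : Nat) : List Int :=
  (List.range' 0 la).map (fun j => (x.getD i []).getD j 0)
    ++ (List.range' la la).map (fun k => (y.getD i []).getD (k - la) 0)

theorem pvRow_length (x y : List (List Int)) (la i : Nat) : (pvRow x y la i).length = la + la := by
  simp [pvRow]

-- one outer-loop body of A = replacing row i by pvRow, provided all rows have length la + la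
theorem pvBody (x y : List (List Int)) (la : Nat) (gi : Nat) (m : List (List Int)) (i : Nat)
    (hi : i < m.length) (hrow : ∀ r ∈ m, r.length = la + la) :
    (List.range' la la).foldl (fun m k => pvSet2 m i k ((y.getD gi []).getD (k - la) 0))
      ((List.range' 0 la).foldl (fun m j => pvSet2 m i j ((x.getD gi []).getD j 0)) m)
      = m.set i (pvRow x y la gi) := by
  have hrlen : (m.getD i []).length = la + la := by
    refine hrow _ ?_
    rw [List.getD_eq_getElem m [] hi]
    exact List.getElem_mem hi
  rw [pvSet2_factor la 0 m i _ hi]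
  have hi' : i < (m.set i ((List.range' 0 la).foldl (fun r j => r.set j ((x.getD gi []).getD j 0)) (m.getD i []))).length := by
    simpa using hi
  rw [pvSet2_factor la la _ i _ hi']
  rw [List.set_set, pvGetD_set_self m i _ [] hi]
  congr 1
  have hrlen' : (m[i]?.getD []).length = la + la := hrlen
  rw [pvRowFold la 0 (m.getD i []) _ (by omega)]
  have hR1len : ((m.getD i []).take 0 ++ (List.range' 0 la).map (fun j => (x.getD gi []).getD j 0) ++ (m.getD i []).drop (0 + la)).length = la + la := by
    simp; omega
  rw [pvRowFold la la _ _ (le_of_eq hR1len.symm)]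
  have hdrop : ((m.getD i []).take 0 ++ (List.range' 0 la).map (fun j => (x.getD gi []).getD j 0) ++ (m.getD i []).drop (0 + la)).drop (la + la) = [] :=
    List.drop_eq_nil_of_le (le_of_eq hR1len)
  rw [hdrop, List.append_nil, pvRow]
  congr 1
  simp only [List.take_zero, List.nil_append, Nat.zero_add]
  rw [List.take_append]
  have hmaplen : ((List.range' 0 la).map (fun j => (x.getD gi []).getD j 0)).length = la := by simp
  rw [List.take_of_length_le (le_of_eq hmaplen), hmaplen, Nat.sub_self]
  simp

-- ===== VERDICT (by name: the statement is the Claim_ definition above) =====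
theorem recombineSubMatrices_spec : Claim_equal_recombineSubMatrices := by
  intro a b c d hdom hpre
  obtain ⟨hb, hc, hd, hra, hrb, hrc, hrd⟩ := hpre
  unfold Spec_recombineSubMatrices recombineSubMatrices recombineSubMatrices_alt
  dsimp only
  have h2 : a.length * 2 - a.length = a.length := by omega
  rw [h2]
  simp only [List.range_eq_range']
  set la := a.length with hla
  -- row-length bounds from Pre_
  have hrowa : ∀ i, i < la → la ≤ (a.getD i []).length :=
    fun i hi => pvPreRow a la i le_rfl (fun r hr => hra r (List.mem_of_mem_take hr)) hi
  have hrowb : ∀ i, i < la → la ≤ (b.getD i []).length := fun i hi => pvPreRow b la i hb hrb hi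
  have hrowc : ∀ i, i < la → la ≤ (c.getD i []).length := fun i hi => pvPreRow c la i hc hrc hi
  have hrowd : ∀ i, i < la → la ≤ (d.getD i []).length := fun i hi => pvPreRow d la i hd hrd hi
  -- the initial zero matrix
  set M0 : List (List Int) := (List.range' 0 (la * 2)).map (fun _ => (List.range' 0 (la * 2)).map (fun _ => (0 : Int))) with hM0
  have hM0len : M0.length = la * 2 := by simp [hM0]
  have hM0rows : ∀ r ∈ M0, r.length = la + la := by
    intro r hr
    rw [hM0] at hr
    obtain ⟨_, _, rfl⟩ := List.mem_map.mp hr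
    simp
    omega
  -- the upper-half loop replaces rows 0..la-1 by pvRow a b la
  have hTop := pvFoldSet
      (fun m i => (List.range' la la).foldl (fun m k => pvSet2 m i k ((b.getD i []).getD (k - la) 0))
        ((List.range' 0 la).foldl (fun m j => pvSet2 m i j ((a.getD i []).getD j 0)) m))
      (pvRow a b la) (fun r => r.length = la + la)
      (pvRow_length a b la)
      (fun m i him hQ => pvBody a b la i m i him hQ)
      la 0 M0 (by omega) hM0rows
  rw [hTop]
  simp only [List.take_zero, List.nil_append, Nat.zero_add]
  set M1 : List (List Int) := (List.range' 0 la).map (pvRow a b la) ++ M0.drop la with hM1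
  have hM1len : M1.length = la * 2 := by simp [hM1, hM0len]; omega
  have hM1rows : ∀ r ∈ M1, r.length = la + la := by
    intro r hr
    rw [hM1] at hr
    rcases List.mem_append.mp hr with h | h
    · obtain ⟨i, _, rfl⟩ := List.mem_map.mp h
      exact pvRow_length a b la i
    · exact hM0rows r (List.mem_of_mem_drop h)
  -- the lower-half loop replaces rows la..2la-1 by pvRow c d la (· - la)
  have hBot := pvFoldSet
      (fun m l => (List.range' la la).foldl (fun m o => pvSet2 m l o ((d.getD (l - la) []).getD (o - la) 0))
        ((List.range' 0 la).foldl (fun m j => pvSet2 m l j ((c.getD (l - la) []).getD j 0)) m))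
      (fun l => pvRow c d la (l - la)) (fun r => r.length = la + la)
      (fun l => pvRow_length c d la (l - la))
      (fun m l him hQ => pvBody c d la (l - la) m l him hQ)
      la la M1 (by omega) hM1rows
  rw [hBot]
  have hE1 : M1.take la = (List.range' 0 la).map (pvRow a b la) := by
    rw [hM1, List.take_append]
    have hmlen : ((List.range' 0 la).map (pvRow a b la)).length = la := by simp
    rw [List.take_of_length_le (le_of_eq hmlen), hmlen, Nat.sub_self]
    simp
  have hE2 : M1.drop (la + la) = [] := List.drop_eq_nil_of_le (by omega)
  rw [hE1, hE2, List.append_nil]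
  -- both halves row by row
  congr 1
  · apply List.map_congr_left
    intro i hi
    have hila : i < la := by
      have := List.mem_range'_1.mp hi
      omega
    rw [pvRow]
    congr 1
    · exact (pvTakeAsMap _ la (hrowa i hila)).symm
    · rw [List.range'_eq_map_range, List.map_map]
      simp only [Function.comp_def, Nat.add_sub_cancel_left]
      rw [List.range_eq_range']
      exact (pvTakeAsMap _ la (hrowb i hila)).symm
  · rw [List.range'_eq_map_range, List.map_map]
    rw [← List.range_eq_range']
    apply List.map_congr_left
    intro i hi
    have hila : i < la := List.mem_range.mp hi
    simp only [Function.comp_def, Nat.add_sub_cancel_left]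
    rw [pvRow]
    congr 1
    · exact (pvTakeAsMap _ la (hrowc i hila)).symm
    · rw [List.range'_eq_map_range, List.map_map]
      simp only [Function.comp_def, Nat.add_sub_cancel_left]
      rw [List.range_eq_range']
      exact (pvTakeAsMap _ la (hrowd i hila)).symm
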